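-- pv_equiv track=rewrite | github.com/MikhaD/Truth-table-generator | Truth table generator.py | simplifyOperations
-- ===== SOURCE A (Python) =====
-- class propositionError(Exception):
--     pass
--
-- def simplifyOperations(array, operators):
--     """simplify array of consecutive operations by removing useless nots and ensuring all operations are valid"""
--     if len(array) == 1 and array[0] is str and len(array[0]) == 1: return array
--     simplified = []
--     allowOthers = True
--     nots = 0
--     for i, operation in enumerate(array):
--         if operation == "!":
--             nots += 1
--             continue
--         elif nots % 2 != 0:
--             simplified.append("!")
--             nots = 0
--         if operation in {"►", "◄"}:
--             simplified.append(operation)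
--             allowOthers = False
--         elif allowOthers:
--             simplified.append(operation)
--             allowOthers = False
--         else:
--             raise propositionError(f"Invalid {operators[operation][0]} statement")
--     if nots % 2 != 0:
--         simplified.append("!")
--     return simplified
-- ===== SOURCE B (Python) =====
-- class propositionError(Exception):
--     pass
--
-- def simplifyOperations(array, operators):
--     """two-pass rewrite: collapse '!'-runs by parity, then validate operators"""
--     if len(array) == 1 and array[0] is str and len(array[0]) == 1: return array
--     # pass 1: collapse each maximal run of '!' into its parity (at most one '!')
--     tokens = []
--     run = 0
--     for op in array:
--         if op == "!":
--             run += 1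
--         else:
--             if run % 2:
--                 tokens.append("!")
--             run = 0
--             tokens.append(op)
--     if run % 2:
--         tokens.append("!")
--     # pass 2: validate — after the first non-'!' token only arrows are allowed
--     out = []
--     seen = False
--     for op in tokens:
--         if op == "!":
--             out.append(op)
--         elif op in ("►", "◄"):
--             out.append(op)
--             seen = True
--         elif not seen:
--             out.append(op)
--             seen = True
--         else:
--             raise propositionError(f"Invalid {operators[op][0]} statement")
--     return out
-- ===== Notes on version B (the rewrite author's own statement) =====
-- stated objective: simpler
-- what changed: Replaces A's single loop carrying a running nots counter and an allowOthers flag by two independent passes: pass 1 collapses each maximal run of '!' into its parity (emitting at most one '!'), pass 2 validates the remaining operators against a seen flag.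
import Mathlib
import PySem

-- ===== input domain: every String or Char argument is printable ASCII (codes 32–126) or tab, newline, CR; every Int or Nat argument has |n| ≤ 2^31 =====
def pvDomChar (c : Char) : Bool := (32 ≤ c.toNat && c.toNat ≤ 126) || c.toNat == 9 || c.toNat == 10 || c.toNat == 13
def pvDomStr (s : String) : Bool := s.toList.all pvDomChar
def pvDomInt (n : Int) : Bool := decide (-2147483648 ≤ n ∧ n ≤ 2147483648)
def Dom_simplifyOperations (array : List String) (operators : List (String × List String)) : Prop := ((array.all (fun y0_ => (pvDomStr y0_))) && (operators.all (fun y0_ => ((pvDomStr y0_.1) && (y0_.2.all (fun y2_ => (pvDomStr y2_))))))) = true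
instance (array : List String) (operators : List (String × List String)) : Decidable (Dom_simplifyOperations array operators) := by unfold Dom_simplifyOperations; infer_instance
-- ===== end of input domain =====

-- B (simpler): replaces A's single loop with nots-counter + allowOthers flag by two clean passes
-- (collapse "!"-runs by parity, then validate operators); same values everywhere A returns.

-- ===== PORT A =====
def pvGoA : List String → Bool → Int → List String
  | [], _, nots => if PySem.Int.mod nots 2 ≠ 0 then ["!"] else []
  | op :: rest, allowOthers, nots =>
    if op = "!" then pvGoA rest allowOthers (nots + 1)
    else
      let pre : List String := if PySem.Int.mod nots 2 ≠ 0 then ["!"] else []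
      let nots' : Int := if PySem.Int.mod nots 2 ≠ 0 then 0 else nots
      if op = "\u25ba" ∨ op = "\u25c4" then pre ++ op :: pvGoA rest false nots'
      else if allowOthers then pre ++ op :: pvGoA rest false nots'
      else pre  -- Python raises propositionError here; excluded by Pre_

def simplifyOperations (array : List String) (operators : List (String × List String)) : List String :=
  -- Python's guard `len(array)==1 and array[0] is str and len(array[0])==1` is always False
  -- (a str value is never identical to the type `str`), so it is a dead branch and not ported.
  pvGoA array true 0

-- ===== PORT B =====
def pvPass1 : List String → Int → List String
  | [], run => if PySem.Int.mod run 2 ≠ 0 then ["!"] else []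
  | op :: rest, run =>
    if op = "!" then pvPass1 rest (run + 1)
    else (if PySem.Int.mod run 2 ≠ 0 then ["!"] else []) ++ op :: pvPass1 rest 0

def pvPass2 : List String → Bool → List String
  | [], _ => []
  | op :: rest, seen =>
    if op = "!" then op :: pvPass2 rest seen
    else if op = "\u25ba" ∨ op = "\u25c4" then op :: pvPass2 rest true
    else if !seen then op :: pvPass2 rest true
    else []  -- Python raises propositionError here; excluded by Pre_

def simplifyOperations_alt (array : List String) (operators : List (String × List String)) : List String :=
  pvPass2 (pvPass1 array 0) false

-- ===== PRECONDITION & SPEC =====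
-- Pre_ excludes exactly the inputs on which A raises propositionError: some non-"!" token
-- after the first non-"!" token is not an arrow.
def Pre_simplifyOperations (array : List String) (operators : List (String × List String)) : Prop :=
  ∀ s ∈ (array.filter (fun t => t != "!")).drop 1, s = "\u25ba" ∨ s = "\u25c4"
instance (array : List String) (operators : List (String × List String)) : Decidable (Pre_simplifyOperations array operators) := by unfold Pre_simplifyOperations; infer_instance
def pvWitness_simplifyOperations : List String × (List (String × List String)) := (["!", "p", "!", "!"], [])

def Spec_simplifyOperations (array : List String) (operators : List (String × List String)) (out : List String) : Prop := out = simplifyOperations_alt array operators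
instance (array : List String) (operators : List (String × List String)) (out : List String) : Decidable (Spec_simplifyOperations array operators out) := by unfold Spec_simplifyOperations; infer_instance

-- ===== CLAIM (what is proved, stated in full; the proofs are below) =====
def Claim_equal_simplifyOperations : Prop := ∀ (array : List String) (operators : List (String × List String)), Dom_simplifyOperations array operators → Pre_simplifyOperations array operators → Spec_simplifyOperations array operators (simplifyOperations array operators)

-- ===== LEMMAS AND PROOFS =====

-- invariant carried through the induction: when `seen` is true every remaining non-"!" token
-- must be an arrow; when `seen` is false this holds of all non-"!" tokens after the first
def pvOk (array : List String) (seen : Bool) : Prop :=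
  ∀ s ∈ (if seen then array.filter (fun t => t != "!")
         else (array.filter (fun t => t != "!")).drop 1), s = "\u25ba" ∨ s = "\u25c4"

theorem pvMod2 (a : Int) : PySem.Int.mod a 2 = a % 2 :=
  PySem.Int.mod_eq_emod_of_pos (by norm_num)

theorem pvOk_cons_bang (rest : List String) (seen : Bool) :
    pvOk ("!" :: rest) seen ↔ pvOk rest seen := by
  cases seen <;> simp [pvOk]

theorem pvOk_cons (op : String) (rest : List String) (seen : Bool) (hbang : op ≠ "!")
    (h : pvOk (op :: rest) seen) : pvOk rest true := by
  intro s hs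
  simp only [if_pos] at hs
  cases seen with
  | true => exact h s (by simp [hbang]; right; simpa using hs)
  | false => exact h s (by simp [hbang]; simpa using hs)

theorem pvOk_head (op : String) (rest : List String) (hbang : op ≠ "!")
    (h : pvOk (op :: rest) true) : op = "\u25ba" ∨ op = "\u25c4" := by
  apply h op
  simp [hbang]

theorem pv_main : ∀ (array : List String) (seen : Bool) (nots nots' : Int),
    nots % 2 = nots' % 2 → pvOk array seen →
    pvGoA array (!seen) nots = pvPass2 (pvPass1 array nots') seen := by
  intro array
  induction array with
  | nil =>
    intro seen nots nots' h _
    simp only [pvGoA, pvPass1, pvMod2, h]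
    split_ifs <;> simp [pvPass2]
  | cons op rest ih =>
    intro seen nots nots' h hok
    by_cases hbang : op = "!"
    · subst hbang
      simp only [pvGoA, pvPass1]
      exact ih seen _ _ (by omega) ((pvOk_cons_bang rest seen).mp hok)
    · have hok' : pvOk rest true := pvOk_cons op rest seen hbang hok
      simp only [pvGoA, pvPass1, pvMod2, if_neg hbang]
      rw [h]
      by_cases harrow : op = "\u25ba" ∨ op = "\u25c4"
      · by_cases hodd : nots' % 2 ≠ 0
        · have hrec := ih true 0 0 rfl hok'
          simp only [Bool.not_true] at hrec
          cases seen <;> simp [hodd, harrow, pvPass2, hbang, hrec]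
        · have hrec := ih true nots 0 (by omega) hok'
          simp only [Bool.not_true] at hrec
          cases seen <;> simp [hodd, harrow, pvPass2, hbang, hrec]
      · cases seen with
        | true => exact absurd (pvOk_head op rest hbang hok) harrow
        | false =>
          by_cases hodd : nots' % 2 ≠ 0
          · have hrec := ih true 0 0 rfl hok'
            simp only [Bool.not_true] at hrec
            simp [hodd, harrow, pvPass2, hbang, hrec]
          · have hrec := ih true nots 0 (by omega) hok'
            simp only [Bool.not_true] at hrec
            simp [hodd, harrow, pvPass2, hbang, hrec]

-- ===== VERDICT (by name: the statement is the Claim_ definition above) =====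
theorem simplifyOperations_spec : Claim_equal_simplifyOperations := by
  intro array operators _ hpre
  unfold Spec_simplifyOperations simplifyOperations simplifyOperations_alt
  exact pv_main array false 0 0 rfl hpre
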